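-- pv_equiv track=rewrite | github.com/good-for-nothin/python-projects | project2.1.py | construct_square_free_word
-- ===== SOURCE A (Python) =====
-- def replace_symbol(symbol, position):
--     """Replace the symbol based on its position (1-based indexing)."""
--     if symbol == '1':
--         return '123' if position % 2 != 0 else '321'
--     elif symbol == '2':
--         return '231' if position % 2 != 0 else '132'
--     elif symbol == '3':
--         return '312' if position % 2 != 0 else '213'
--
-- def construct_square_free_word(n):
--     """Construct a square-free word up to the nth iteration."""
--     word = '1'  # Start with a0
--
--     # Iteratively construct the word up to the nth iteration
--     for _ in range(n):
--         new_word = ''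
--         for index, symbol in enumerate(word):
--             # Position in the word is index + 1 (1-based index)
--             new_word += replace_symbol(symbol, index + 1)
--         word = new_word
--
--     return word
-- ===== SOURCE B (Python) =====
-- _RULES = {('1', True): '123', ('1', False): '321',
--           ('2', True): '231', ('2', False): '132',
--           ('3', True): '312', ('3', False): '213'}
--
--
-- def _expand(sym, odd, m):
--     """The block of 3**m characters that symbol `sym` at a position of the
--     given 1-based parity expands to after m substitution rounds.
--
--     The rule depends only on the position's parity, and since a block's
--     length 3**m is odd, parities propagate to the three children as
--     (same, flipped, same) — so the whole word is a depth-first expansion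
--     from the root state ('1', odd position)."""
--     if m == 0:
--         return sym
--     a, b, c = _RULES[sym, odd]
--     return (_expand(a, odd, m - 1)
--             + _expand(b, not odd, m - 1)
--             + _expand(c, odd, m - 1))
--
--
-- def construct_square_free_word(n):
--     return _expand('1', True, max(n, 0))
-- ===== Notes on version B (the rewrite author's own statement) =====
-- stated objective: alternative
-- what changed: Instead of rewriting the whole word layer by layer with 1-based position lookups, B expands the word depth-first from a (symbol, position-parity) root state, using that the substitution rule depends only on position parity and that parities propagate to the three children as (same, flipped, same).
import Mathlib
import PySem

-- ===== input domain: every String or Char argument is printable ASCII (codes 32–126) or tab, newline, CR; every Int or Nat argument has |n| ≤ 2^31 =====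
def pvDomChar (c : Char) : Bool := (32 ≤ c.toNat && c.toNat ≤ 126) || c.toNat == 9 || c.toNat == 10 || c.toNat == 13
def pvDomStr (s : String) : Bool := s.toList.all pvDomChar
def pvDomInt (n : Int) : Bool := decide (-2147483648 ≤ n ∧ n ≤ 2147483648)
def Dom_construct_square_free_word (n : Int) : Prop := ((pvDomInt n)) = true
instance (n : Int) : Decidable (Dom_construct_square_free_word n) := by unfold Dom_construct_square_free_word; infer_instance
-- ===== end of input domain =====

-- B expands the word depth-first from a (symbol, position-parity) root state, using that the
-- substitution rule depends only on position parity and parities propagate as (same, flipped, same)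
-- to the three children — instead of A's layer-by-layer rewriting (objective: alternative).

-- ===== PORT A =====
def replace_symbol (symbol : Char) (position : Int) : String :=
  if symbol = '1' then (if PySem.Int.mod position 2 ≠ 0 then "123" else "321")
  else if symbol = '2' then (if PySem.Int.mod position 2 ≠ 0 then "231" else "132")
  else if symbol = '3' then (if PySem.Int.mod position 2 ≠ 0 then "312" else "213")
  else ""  -- Python falls off the function (None) here; unreachable: every symbol of the word is '1', '2' or '3'

-- the enumerate loop is ported as a fold that threads Python's running index
-- (tail-recursive, so it also evaluates on long words); index + 1 is the 1-based position
def construct_square_free_word (n : Int) : String :=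
  (PySem.List.pyRange 0 n 1).foldl
    (fun word _ =>
      (word.toList.foldl
        (fun (acc : String × Int) symbol =>
          (acc.1 ++ replace_symbol symbol (acc.2 + 1), acc.2 + 1)) ("", 0)).1)
    "1"

-- ===== PORT B =====
-- the _RULES dict of Source B (a total match; the Python KeyError branch is unreachable: sym is always '1', '2' or '3')
def sfw_rules (sym : Char) (odd : Bool) : String :=
  match sym, odd with
  | '1', true  => "123" | '1', false => "321"
  | '2', true  => "231" | '2', false => "132"
  | '3', true  => "312" | '3', false => "213"
  | _,   _     => ""

-- _expand of Source B. m is a nonnegative Python int at every call (m = max(n,0), decreasing to 0),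
-- so Nat is exact; the unpack `a, b, c = _RULES[sym, odd]` is indexing a string that always has
-- length 3, so the in-range indexings are exact and the getD defaults are never used.
def sfw_expand (sym : Char) (odd : Bool) (m : Nat) : String :=
  match m with
  | 0 => String.ofList [sym]
  | m + 1 =>
    let t := sfw_rules sym odd
    let a := (PySem.Str.pyGet? t 0).getD ' '
    let b := (PySem.Str.pyGet? t 1).getD ' '
    let c := (PySem.Str.pyGet? t 2).getD ' '
    sfw_expand a odd m ++ sfw_expand b (!odd) m ++ sfw_expand c odd m

def construct_square_free_word_alt (n : Int) : String :=
  sfw_expand '1' true (max n 0).toNat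

-- ===== PRECONDITION & SPEC =====
def Spec_construct_square_free_word (n : Int) (out : String) : Prop := out = construct_square_free_word_alt n
instance (n : Int) (out : String) : Decidable (Spec_construct_square_free_word n out) := by unfold Spec_construct_square_free_word; infer_instance

-- ===== CLAIM (what is proved, stated in full; the proofs are below) =====
def Claim_equal_construct_square_free_word : Prop := ∀ (n : Int), Dom_construct_square_free_word n → Spec_construct_square_free_word n (construct_square_free_word n)

-- ===== LEMMAS AND PROOFS =====

-- the word after m rounds of A's rewriting, as a list of characters
def sfwW : Nat → List Char
  | 0 => ['1']
  | m + 1 => (PySem.List.enumerate (sfwW m) 0).flatMap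
      (fun p => (replace_symbol p.2 (p.1 + 1)).toList)

-- A's inner loop as a function on strings
def sfwStep (w : String) : String :=
  (w.toList.foldl
    (fun (acc : String × Int) symbol =>
      (acc.1 ++ replace_symbol symbol (acc.2 + 1), acc.2 + 1)) ("", 0)).1

-- the (symbol, parity) state of the d-th child of a node in state st
def sfw_child (st : Char × Bool) (d : Nat) : Char × Bool :=
  ((PySem.Str.pyGet? (sfw_rules st.1 st.2) (d : Int)).getD ' ',
   if d = 1 then !st.2 else st.2)

-- the state of the i-th leaf, m levels below a root in state st
def sfw_leafFrom (st : Char × Bool) : Nat → Nat → Char × Bool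
  | 0, _ => st
  | m + 1, i => sfw_child (sfw_leafFrom st m (i / 3)) (i % 3)

lemma foldl_ignore_iterate {α β : Type} (l : List α) (f : β → β) (b : β) :
    l.foldl (fun w _ => f w) b = f^[l.length] b := by
  induction l generalizing b with
  | nil => rfl
  | cons x t ih => simp [List.foldl_cons, ih, Function.iterate_succ_apply]

lemma sfw_A_eq_iterate (n : Int) :
    construct_square_free_word n = sfwStep^[n.toNat] "1" := by
  unfold construct_square_free_word
  rw [foldl_ignore_iterate]
  simp only [PySem.List.length_pyRange_one, Int.sub_zero]
  rfl

lemma foldl_counter (l : List Char) : ∀ (acc : String) (k : Int),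
    (l.foldl (fun (a : String × Int) c => (a.1 ++ replace_symbol c (a.2 + 1), a.2 + 1)) (acc, k)).1
      = String.ofList (acc.toList ++ (PySem.List.enumerate l k).flatMap
          (fun p => (replace_symbol p.2 (p.1 + 1)).toList)) := by
  induction l with
  | nil => intro acc k; simp [PySem.List.enumerate_nil, String.ofList_toList]
  | cons c t ih =>
    intro acc k
    rw [List.foldl_cons, PySem.List.enumerate_cons]
    rw [ih (acc ++ replace_symbol c (k + 1)) (k + 1)]
    simp [String.toList_append]

lemma sfwStep_ofList (L : List Char) :
    sfwStep (String.ofList L)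
      = String.ofList ((PySem.List.enumerate L 0).flatMap
          (fun p => (replace_symbol p.2 (p.1 + 1)).toList)) := by
  unfold sfwStep
  rw [foldl_counter]
  simp [String.toList_ofList]

lemma sfw_iterate_eq_W (m : Nat) : sfwStep^[m] "1" = String.ofList (sfwW m) := by
  induction m with
  | zero => rfl
  | succ m ih =>
    rw [Function.iterate_succ_apply', ih]
    rw [sfwStep_ofList]
    rfl

lemma sfw_leaf_parity (m : Nat) :
    ∀ i, i < 3 ^ m → (sfw_leafFrom ('1', true) m i).2 = decide (i % 2 = 0) := by
  induction m with
  | zero =>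
    intro i hi
    have h0 : i = 0 := by simpa using hi
    subst h0; simp [sfw_leafFrom]
  | succ m ih =>
    intro i hi
    have hlt : i / 3 < 3 ^ m :=
      (Nat.div_lt_iff_lt_mul (by norm_num)).2 (by rw [pow_succ] at hi; exact hi)
    have hexp : (sfw_leafFrom ('1', true) (m + 1) i).2
        = if i % 3 = 1 then !(sfw_leafFrom ('1', true) m (i / 3)).2
          else (sfw_leafFrom ('1', true) m (i / 3)).2 := rfl
    rw [hexp, ih (i / 3) hlt]
    have h3 : i % 3 = 0 ∨ i % 3 = 1 ∨ i % 3 = 2 := by omega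
    rcases h3 with h | h | h
    · rw [if_neg (by omega)]; exact decide_eq_decide.mpr (by omega)
    · rw [if_pos h, ← decide_not]; exact decide_eq_decide.mpr (by omega)
    · rw [if_neg (by omega)]; exact decide_eq_decide.mpr (by omega)

lemma sfw_leaf_mem (m i : Nat) :
    (sfw_leafFrom ('1', true) m i).1 = '1' ∨ (sfw_leafFrom ('1', true) m i).1 = '2'
      ∨ (sfw_leafFrom ('1', true) m i).1 = '3' := by
  induction m generalizing i with
  | zero => simp [sfw_leafFrom]
  | succ m ih =>
    have h3 : i % 3 = 0 ∨ i % 3 = 1 ∨ i % 3 = 2 := by omega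
    rcases ih (i / 3) with hc | hc | hc <;>
      rcases hb : (sfw_leafFrom ('1', true) m (i / 3)).2 with _ | _ <;>
        rcases h3 with h | h | h <;>
          simp [sfw_leafFrom, sfw_child, hc, hb, h, sfw_rules, PySem.Str.pyGet?]

-- A's replacement string equals B's rule string once the 1-based position parity is named
lemma replace_eq_rules (c : Char) (hc : c = '1' ∨ c = '2' ∨ c = '3') (q : Nat) :
    replace_symbol c ((q : Int) + 1) = sfw_rules c (decide (q % 2 = 0)) := by
  rcases hc with h | h | h <;>
    rcases hq : decide (q % 2 = 0) with _ | _ <;>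
      simp at hq <;>
        simp [replace_symbol, sfw_rules, h] <;> omega

lemma enumerate_map_range {α : Type} (f : Nat → α) (N : Nat) (s : Int) :
    PySem.List.enumerate ((List.range N).map f) s
      = (List.range N).map (fun (q : Nat) => (s + (q : Int), f q)) := by
  induction N generalizing s with
  | zero => simp [PySem.List.enumerate_nil]
  | succ N ih =>
    rw [List.range_succ]
    simp only [List.map_append, List.map_cons, List.map_nil,
      PySem.List.enumerate_append, PySem.List.enumerate_cons, PySem.List.enumerate_nil, ih]
    simp

lemma rules_toList (c : Char) (hc : c = '1' ∨ c = '2' ∨ c = '3') (b : Bool) :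
    (sfw_rules c b).toList
      = [(PySem.Str.pyGet? (sfw_rules c b) (0 : Int)).getD ' ',
         (PySem.Str.pyGet? (sfw_rules c b) (1 : Int)).getD ' ',
         (PySem.Str.pyGet? (sfw_rules c b) (2 : Int)).getD ' '] := by
  rcases hc with h | h | h <;> cases b <;> simp [sfw_rules, h, PySem.Str.pyGet?]

lemma flatMap_range_three {α : Type} (N : Nat) (c : Nat → α) :
    (List.range N).flatMap (fun q => [c (3 * q), c (3 * q + 1), c (3 * q + 2)])
      = (List.range (3 * N)).map c := by
  induction N with
  | zero => simp
  | succ N ih =>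
    rw [List.range_succ, List.flatMap_append, ih]
    have h : 3 * (N + 1) = (3 * N + 1 + 1) + 1 := by ring
    rw [h, List.range_succ, List.range_succ, List.range_succ]
    simp

lemma sfw_W_eq_leaves (m : Nat) :
    sfwW m = (List.range (3 ^ m)).map (fun i => (sfw_leafFrom ('1', true) m i).1) := by
  induction m with
  | zero => simp [sfwW, sfw_leafFrom]
  | succ m ih =>
    have h3m : (3 : Nat) ^ (m + 1) = 3 * 3 ^ m := by ring
    have hW : sfwW (m + 1) = (PySem.List.enumerate (sfwW m) 0).flatMap
        (fun p => (replace_symbol p.2 (p.1 + 1)).toList) := rfl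
    rw [hW, ih, enumerate_map_range, List.flatMap_map]
    simp only [zero_add]
    have hstep : ∀ q ∈ List.range (3 ^ m),
        (replace_symbol (sfw_leafFrom ('1', true) m q).1 ((q : Int) + 1)).toList
          = [(sfw_leafFrom ('1', true) (m+1) (3*q)).1,
             (sfw_leafFrom ('1', true) (m+1) (3*q+1)).1,
             (sfw_leafFrom ('1', true) (m+1) (3*q+2)).1] := by
      intro q hq
      rw [List.mem_range] at hq
      have hmem := sfw_leaf_mem m q
      have hpar := sfw_leaf_parity m q hq
      have c0 : (sfw_leafFrom ('1', true) (m+1) (3*q)).1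
          = (PySem.Str.pyGet? (sfw_rules (sfw_leafFrom ('1', true) m q).1
              (sfw_leafFrom ('1', true) m q).2) (0 : Int)).getD ' ' := by
        simp [sfw_leafFrom, sfw_child, show 3*q/3 = q from by omega, show 3*q%3 = 0 from by omega]
      have c1 : (sfw_leafFrom ('1', true) (m+1) (3*q+1)).1
          = (PySem.Str.pyGet? (sfw_rules (sfw_leafFrom ('1', true) m q).1
              (sfw_leafFrom ('1', true) m q).2) (1 : Int)).getD ' ' := by
        simp [sfw_leafFrom, sfw_child, show (3*q+1)/3 = q from by omega, show (3*q+1)%3 = 1 from by omega]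
      have c2 : (sfw_leafFrom ('1', true) (m+1) (3*q+2)).1
          = (PySem.Str.pyGet? (sfw_rules (sfw_leafFrom ('1', true) m q).1
              (sfw_leafFrom ('1', true) m q).2) (2 : Int)).getD ' ' := by
        simp [sfw_leafFrom, sfw_child, show (3*q+2)/3 = q from by omega, show (3*q+2)%3 = 2 from by omega]
      rw [replace_eq_rules _ hmem q, ← hpar, rules_toList _ hmem, c0, c1, c2]
    rw [List.flatMap_congr hstep, h3m]
    exact flatMap_range_three (3 ^ m) (fun i => (sfw_leafFrom ('1', true) (m+1) i).1)

-- splitting a leaf walk at the most significant base-3 digit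
lemma leafFrom_shift (m : Nat) : ∀ (st : Char × Bool) (i : Nat), i < 3 ^ (m + 1) →
    sfw_leafFrom st (m + 1) i = sfw_leafFrom (sfw_child st (i / 3 ^ m)) m (i % 3 ^ m) := by
  induction m with
  | zero =>
    intro st i hi
    have h3 : i < 3 := by simpa using hi
    show sfw_child (sfw_leafFrom st 0 (i / 3)) (i % 3) = sfw_leafFrom (sfw_child st (i / 3 ^ 0)) 0 (i % 3 ^ 0)
    simp [sfw_leafFrom, Nat.mod_eq_of_lt h3]
  | succ m ih =>
    intro st i hi
    have hlt : i / 3 < 3 ^ (m + 1) :=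
      (Nat.div_lt_iff_lt_mul (by norm_num)).2 (by rw [pow_succ] at hi; exact hi)
    have h1 : i / 3 / 3 ^ m = i / 3 ^ (m + 1) := by
      rw [Nat.div_div_eq_div_mul, ← pow_succ']
    have h2 : i % 3 ^ (m + 1) % 3 = i % 3 := Nat.mod_mod_of_dvd i (dvd_pow_self 3 (Nat.succ_ne_zero m))
    have h3 : i / 3 % 3 ^ m = i % 3 ^ (m + 1) / 3 := by
      rw [pow_succ', Nat.mod_mul_right_div_self]
    show sfw_child (sfw_leafFrom st (m + 1) (i / 3)) (i % 3)
        = sfw_child (sfw_leafFrom (sfw_child st (i / 3 ^ (m + 1))) m (i % 3 ^ (m + 1) / 3)) (i % 3 ^ (m + 1) % 3)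
    rw [ih st (i / 3) hlt, h1, h2, h3]

lemma sfw_expand_toList (m : Nat) : ∀ (sym : Char) (odd : Bool),
    (sfw_expand sym odd m).toList
      = (List.range (3 ^ m)).map (fun i => (sfw_leafFrom (sym, odd) m i).1) := by
  induction m with
  | zero => intro sym odd; simp [sfw_expand, sfw_leafFrom]
  | succ m ih =>
    intro sym odd
    have hp : 0 < 3 ^ m := pow_pos (by norm_num) m
    have key : ∀ (b : Nat), b < 3 → ∀ k, k < 3 ^ m →
        sfw_leafFrom (sym, odd) (m + 1) (3 ^ m * b + k) = sfw_leafFrom (sfw_child (sym, odd) b) m k := by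
      intro b hb k hk
      have hlt : 3 ^ m * b + k < 3 ^ (m + 1) := by
        have hps : (3 : Nat) ^ (m + 1) = 3 ^ m * 3 := pow_succ 3 m
        interval_cases b <;> omega
      rw [leafFrom_shift m _ _ hlt]
      have hd : (3 ^ m * b + k) / 3 ^ m = b := by
        rw [Nat.mul_add_div hp, Nat.div_eq_of_lt hk, Nat.add_zero]
      have hm : (3 ^ m * b + k) % 3 ^ m = k := by
        rw [Nat.mul_add_mod, Nat.mod_eq_of_lt hk]
      rw [hd, hm]
    have hsplit : (3 : Nat) ^ (m + 1) = 3 ^ m + (3 ^ m + 3 ^ m) := by ring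
    have hR : (List.range (3 ^ (m + 1))).map (fun i => (sfw_leafFrom (sym, odd) (m + 1) i).1)
        = (List.range (3 ^ m)).map (fun i => (sfw_leafFrom (sym, odd) (m + 1) i).1)
          ++ ((List.range (3 ^ m)).map (fun k => (sfw_leafFrom (sym, odd) (m + 1) (3 ^ m + k)).1)
          ++ (List.range (3 ^ m)).map (fun k => (sfw_leafFrom (sym, odd) (m + 1) (3 ^ m + (3 ^ m + k))).1)) := by
      rw [hsplit]
      simp [List.range_add, List.map_append, List.map_map, Function.comp_def]
    have hB0 : (List.range (3 ^ m)).map (fun i => (sfw_leafFrom (sym, odd) (m + 1) i).1)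
        = (List.range (3 ^ m)).map (fun i => (sfw_leafFrom (sfw_child (sym, odd) 0) m i).1) := by
      refine List.map_congr_left (fun k hk => ?_)
      rw [List.mem_range] at hk
      have h := key 0 (by omega) k hk
      rw [Nat.mul_zero, Nat.zero_add] at h
      rw [h]
    have hB1 : (List.range (3 ^ m)).map (fun k => (sfw_leafFrom (sym, odd) (m + 1) (3 ^ m + k)).1)
        = (List.range (3 ^ m)).map (fun i => (sfw_leafFrom (sfw_child (sym, odd) 1) m i).1) := by
      refine List.map_congr_left (fun k hk => ?_)
      rw [List.mem_range] at hk
      have h := key 1 (by omega) k hk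
      rw [Nat.mul_one] at h
      rw [h]
    have hB2 : (List.range (3 ^ m)).map (fun k => (sfw_leafFrom (sym, odd) (m + 1) (3 ^ m + (3 ^ m + k))).1)
        = (List.range (3 ^ m)).map (fun i => (sfw_leafFrom (sfw_child (sym, odd) 2) m i).1) := by
      refine List.map_congr_left (fun k hk => ?_)
      rw [List.mem_range] at hk
      have h := key 2 (by omega) k hk
      have e : 3 ^ m * 2 + k = 3 ^ m + (3 ^ m + k) := by ring
      rw [e] at h
      rw [h]
    have hL : (sfw_expand sym odd (m + 1)).toList
        = (sfw_expand ((PySem.Str.pyGet? (sfw_rules sym odd) 0).getD ' ') odd m).toList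
          ++ ((sfw_expand ((PySem.Str.pyGet? (sfw_rules sym odd) 1).getD ' ') (!odd) m).toList
          ++ (sfw_expand ((PySem.Str.pyGet? (sfw_rules sym odd) 2).getD ' ') odd m).toList) := by
      show (sfw_expand _ odd m ++ sfw_expand _ (!odd) m ++ sfw_expand _ odd m).toList = _
      rw [String.toList_append, String.toList_append, List.append_assoc]
    rw [hL, hR, hB0, hB1, hB2, ih, ih, ih]
    have e0 : (((PySem.Str.pyGet? (sfw_rules sym odd) 0).getD ' '), odd) = sfw_child (sym, odd) 0 := by
      simp [sfw_child]
    have e1 : (((PySem.Str.pyGet? (sfw_rules sym odd) 1).getD ' '), !odd) = sfw_child (sym, odd) 1 := by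
      simp [sfw_child]
    have e2 : (((PySem.Str.pyGet? (sfw_rules sym odd) 2).getD ' '), odd) = sfw_child (sym, odd) 2 := by
      simp [sfw_child]
    rw [e0, e1, e2]

-- ===== VERDICT (by name: the statement is the Claim_ definition above) =====
theorem construct_square_free_word_spec : Claim_equal_construct_square_free_word := by
  intro n _
  show construct_square_free_word n = construct_square_free_word_alt n
  rw [sfw_A_eq_iterate, sfw_iterate_eq_W, sfw_W_eq_leaves]
  unfold construct_square_free_word_alt
  have hmax : (max n 0).toNat = n.toNat := by omega
  rw [hmax, ← sfw_expand_toList n.toNat '1' true]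
  exact String.ofList_toList
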